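-- pv_equiv track=rewrite | github.com/HiShiGaming/PythonAdhoc | cap duong.py | da
-- ===== SOURCE A (Python) =====
-- def da(a):
--     b=[]
--     c=[]
--     z=0
--     for i in a:
--         if i > 0 :
--             b.append(i)
--         else:
--             c.append(i)
--     for m in range(len(b)):
--         for j in range(m+1,len(b)):
--             z+=1
--     for p in range(len(c)):
--         for u in range(p+1,len(c)):
--             z+=1
--     return z
-- ===== SOURCE B (Python) =====
-- def da(a):
--     p = sum(1 for i in a if i > 0)
--     q = len(a) - p
--     return p * (p - 1) // 2 + q * (q - 1) // 2
-- ===== Notes on version B (the rewrite author's own statement) =====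
-- stated objective: faster
-- what changed: Counts positives and non-positives in a single pass and returns k*(k-1)//2 for each group instead of materialising both groups and counting pairs with nested quadratic loops.
import Mathlib
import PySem

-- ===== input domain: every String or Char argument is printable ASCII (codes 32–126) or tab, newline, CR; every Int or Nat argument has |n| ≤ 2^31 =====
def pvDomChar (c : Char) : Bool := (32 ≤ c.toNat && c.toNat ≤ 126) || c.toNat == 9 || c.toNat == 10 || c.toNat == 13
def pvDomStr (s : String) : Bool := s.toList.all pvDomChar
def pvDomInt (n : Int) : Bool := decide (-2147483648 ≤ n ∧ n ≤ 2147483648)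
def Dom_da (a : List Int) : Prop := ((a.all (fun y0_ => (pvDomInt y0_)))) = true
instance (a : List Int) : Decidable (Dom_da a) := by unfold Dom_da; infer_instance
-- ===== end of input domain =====

-- B counts positives and non-positives in one pass and uses k*(k-1)//2; asymptotically faster than A's nested loops.

-- ===== PORT A =====
-- literal port: partition into b (positives) and c (rest), then count pairs with nested index loops
def da (a : List Int) : Int :=
  let bc := a.foldl (fun (s : List Int × List Int) i =>
      if i > 0 then (s.1 ++ [i], s.2) else (s.1, s.2 ++ [i])) ([], [])
  let z1 := (PySem.List.pyRange 0 bc.1.length 1).foldl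
      (fun z m => (PySem.List.pyRange (m + 1) bc.1.length 1).foldl (fun z _ => z + 1) z) 0
  (PySem.List.pyRange 0 bc.2.length 1).foldl
      (fun z p => (PySem.List.pyRange (p + 1) bc.2.length 1).foldl (fun z _ => z + 1) z) z1

-- ===== PORT B =====
def da_alt (a : List Int) : Int :=
  let p : Int := (a.countP (fun i => decide (i > 0)) : Int)
  let q : Int := (a.length : Int) - p
  PySem.Int.floordiv (p * (p - 1)) 2 + PySem.Int.floordiv (q * (q - 1)) 2

-- ===== PRECONDITION & SPEC =====
def Spec_da (a : List Int) (out : Int) : Prop := out = da_alt a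
instance (a : List Int) (out : Int) : Decidable (Spec_da a out) := by unfold Spec_da; infer_instance

-- ===== CLAIM (what is proved, stated in full; the proofs are below) =====
def Claim_equal_da : Prop := ∀ (a : List Int), Dom_da a → Spec_da a (da a)

-- ===== LEMMAS AND PROOFS =====

-- the partition loop of A: lengths of the two accumulated lists
theorem da_part_len (a : List Int) (b c : List Int) :
    (a.foldl (fun (s : List Int × List Int) i =>
      if i > 0 then (s.1 ++ [i], s.2) else (s.1, s.2 ++ [i])) (b, c)).1.length
      = b.length + a.countP (fun i => decide (i > 0)) ∧
    (a.foldl (fun (s : List Int × List Int) i =>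
      if i > 0 then (s.1 ++ [i], s.2) else (s.1, s.2 ++ [i])) (b, c)).2.length
      = c.length + a.countP (fun i => decide (¬ i > 0)) := by
  induction a generalizing b c with
  | nil => simp
  | cons x xs ih =>
    by_cases hx : x > 0
    · obtain ⟨i1, i2⟩ := ih (b ++ [x]) c
      simp only [List.foldl_cons, if_pos hx, List.countP_cons, i1, i2]
      simp [hx]; omega
    · obtain ⟨i1, i2⟩ := ih b (c ++ [x])
      simp only [List.foldl_cons, if_neg hx, List.countP_cons, i1, i2]
      simp [hx]
      omega

-- the nested pair-counting loop of A adds n*(n-1)/2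
theorem da_pairs (n : Nat) (z0 : Int) :
    (PySem.List.pyRange 0 (n : Int) 1).foldl
      (fun z m => (PySem.List.pyRange (m + 1) (n : Int) 1).foldl (fun z _ => z + 1) z) z0
    = z0 + (n * (n - 1) / 2 : Nat) := by
  have inner : ∀ (l : List Int) (z : Int), l.foldl (fun z _ => z + 1) z = z + l.length := by
    intro l z
    simp only [PySem.List.foldl_add, PySem.List.sum_map_const_int]
    ring
  simp only [inner, PySem.List.length_pyRange_one]
  simp only [PySem.List.foldl_add]
  congr 1
  rw [PySem.List.pyRange_one, List.map_map]
  simp only [Function.comp_def]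
  rw [show ((n : Int) - 0).toNat = n from by simp]
  have step : ∀ k ∈ List.range n,
      ((((n : Int) - ((0 : Int) + (k : Int) + 1)).toNat : Int)) = ((n - 1 - k : Nat) : Int) := by
    intro k hk
    rw [List.mem_range] at hk
    omega
  rw [List.map_congr_left step]
  have : ((List.range n).map (fun k => ((n - 1 - k : Nat) : Int))).sum
      = ∑ i ∈ Finset.range n, ((n - 1 - i : Nat) : Int) := by
    exact Int.neg_inj.mp rfl
  rw [this, ← Nat.cast_sum, Finset.sum_range_reflect (fun i => i) n]
  rw [show (∑ j ∈ Finset.range n, j) = n * (n - 1) / 2 from Finset.sum_range_id n]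

-- floordiv form of the triangular number
theorem da_floordiv (n : Nat) :
    PySem.Int.floordiv ((n : Int) * ((n : Int) - 1)) 2 = ((n * (n - 1) / 2 : Nat) : Int) := by
  cases n with
  | zero => decide
  | succ m =>
    have : ((m + 1 : Nat) : Int) * (((m + 1 : Nat) : Int) - 1) = (((m + 1) * m : Nat) : Int) := by
      push_cast; ring
    rw [this]
    have h2 : ((m + 1) * (m + 1 - 1) : Nat) = (m + 1) * m := by simp
    rw [h2]
    exact_mod_cast PySem.Int.floordiv_natCast ((m + 1) * m) 2

-- ===== VERDICT (by name: the statement is the Claim_ definition above) =====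
theorem da_spec : Claim_equal_da := by
  intro a _
  unfold Spec_da da da_alt
  obtain ⟨h1, h2⟩ := da_part_len a [] []
  simp only [List.length_nil, Nat.zero_add] at h1 h2
  simp only [h1, h2, da_pairs]
  have hsum : a.countP (fun i => decide (i > 0)) + a.countP (fun i => decide (¬ i > 0))
      = a.length := by
    have := (List.length_eq_countP_add_countP (fun i => decide (i > 0)) (l := a)).symm
    simpa using this
  have hq : ((a.length : Int) - (a.countP (fun i => decide (i > 0)) : Int))
      = ((a.countP (fun i => decide (¬ i > 0)) : Nat) : Int) := by omega
  rw [hq, da_floordiv, da_floordiv]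
  omega
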